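-- pv_equiv track=rewrite | github.com/PassByGithub/Practice | Mega_Project_List/Classic_Algorithm/Closet_Pair_Problem.py | listsort
-- ===== SOURCE A (Python) =====
-- def listsort(x,y):
--     list_sort=sorted(x)
--     y_sorted=[]
--     for i in range(len(x)):
--         location=x.index(list_sort[i])
--         x[location]="NONE"
--         y_sorted.append(y[location])
--     return list_sort,y_sorted
-- ===== SOURCE B (Python) =====
-- # Stable sort of the (x, y) pairs by x-key, then unzip: O(n log n) instead of A's
-- # repeated O(n) x.index scans; unlike A, B does not mutate x in place (return value equal).
-- def listsort(x, y):
--     pairs = sorted(zip(x, y), key=lambda p: p[0])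
--     return [p[0] for p in pairs], [p[1] for p in pairs]
-- ===== Notes on version B (the rewrite author's own statement) =====
-- stated objective: faster
-- what changed: Replaces A's repeated linear x.index scans with in-place "NONE" marking by a single stable sort of the zipped (x, y) pairs on the x component, then unzipping; B also does not mutate x.
import Mathlib
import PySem

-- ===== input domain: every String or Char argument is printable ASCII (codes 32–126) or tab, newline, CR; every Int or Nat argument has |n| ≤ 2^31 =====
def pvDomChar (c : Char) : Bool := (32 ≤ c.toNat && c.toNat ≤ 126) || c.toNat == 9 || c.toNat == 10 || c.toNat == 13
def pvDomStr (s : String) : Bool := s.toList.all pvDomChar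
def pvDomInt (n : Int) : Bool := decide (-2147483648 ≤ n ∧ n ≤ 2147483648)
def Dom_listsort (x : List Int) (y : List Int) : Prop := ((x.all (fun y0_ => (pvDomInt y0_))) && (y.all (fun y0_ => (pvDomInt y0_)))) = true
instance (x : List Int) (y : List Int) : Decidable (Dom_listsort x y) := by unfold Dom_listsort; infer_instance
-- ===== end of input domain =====

-- B replaces A's repeated linear x.index scans by one stable sort of the zipped pairs (faster);
-- A mutates its argument x in place (cells set to "NONE"), B does not: the equivalence is about the return value only.

-- ===== PORT A =====
-- the marked working copy of x holds Option Int: 'none' plays the role of the string "NONE"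
-- (an Int compares unequal to "NONE" in Python, exactly as 'some v ≠ none')
def listsort (x : List Int) (y : List Int) : List Int × List Int :=
  let list_sort := PySem.List.sorted x (fun v => v) false
  let st := (PySem.List.pyRange 0 (PySem.List.len x) 1).foldl
    (fun (st : List (Option Int) × List Int) i =>
      let v := PySem.List.pyGetD list_sort i 0
      let location : Int := ((PySem.List.index? st.1 (some v)).getD 0 : Nat)
      (PySem.List.pySetD st.1 location none,
       st.2 ++ [PySem.List.pyGetD y location 0]))
    (x.map some, ([] : List Int))
  (list_sort, st.2)

-- ===== PORT B =====
def listsort_alt (x : List Int) (y : List Int) : List Int × List Int :=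
  let pairs := PySem.List.sorted (x.zip y) (fun p => p.1) false
  (pairs.map (fun p => p.1), pairs.map (fun p => p.2))

-- ===== PRECONDITION & SPEC =====
-- Pre_ excludes exactly the inputs where A raises IndexError: when len(y) < len(x) the loop
-- eventually reads y[location] at some location ≥ len(y).
def Pre_listsort (x : List Int) (y : List Int) : Prop := x.length ≤ y.length
instance (x : List Int) (y : List Int) : Decidable (Pre_listsort x y) := by unfold Pre_listsort; infer_instance

def pvWitness_listsort : List Int × List Int := ([2, 1, 2], [10, 20, 30])

def Spec_listsort (x : List Int) (y : List Int) (out : List Int × List Int) : Prop := out = listsort_alt x y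
instance (x : List Int) (y : List Int) (out : List Int × List Int) : Decidable (Spec_listsort x y out) := by unfold Spec_listsort; infer_instance

-- ===== CLAIM (what is proved, stated in full; the proofs are below) =====
def Claim_equal_listsort : Prop := ∀ (x : List Int) (y : List Int), Dom_listsort x y → Pre_listsort x y → Spec_listsort x y (listsort x y)

-- ===== LEMMAS AND PROOFS =====

-- the combined (value, index) key: lexicographic (value, original position) encoded into one Int,
-- valid because every position lies in [0, N]
def Kf (N : Int) (t : Int × Int × Int) : Int := t.2.1 * (N + 1) + t.1

-- the loop body of A, with the current sorted value abstracted out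
def fStep (y : List Int) (st : List (Option Int) × List Int) (v : Int) :
    List (Option Int) × List Int :=
  (PySem.List.pySetD st.1 (((PySem.List.index? st.1 (some v)).getD 0 : Nat) : Int) none,
   st.2 ++ [PySem.List.pyGetD y (((PySem.List.index? st.1 (some v)).getD 0 : Nat) : Int) 0])

-- marking: x[location] = "NONE"
def markF (m : List (Option Int)) (t : Int × Int × Int) : List (Option Int) :=
  PySem.List.pySetD m t.1 none

def Mmark (x : List Int) (T : List (Int × Int × Int)) : List (Option Int) :=
  T.foldl markF (x.map some)

def Sdec (x : List Int) (y : List Int) : List (Int × Int × Int) :=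
  PySem.List.sorted (PySem.List.enumerate (x.zip y) 0) (Kf (x.length : Int)) false

-- arithmetic of the encoded key
lemma arith_lt_iff (N i j a b : Int) (hj : 0 ≤ j) (hji : j < i) (hiN : i ≤ N) :
    (a * (N + 1) + i < b * (N + 1) + j) ↔ a < b := by
  constructor
  · intro h
    by_contra hb
    push_neg at hb
    have h1 : 0 ≤ (a - b) * (N + 1) := mul_nonneg (by omega) (by omega)
    nlinarith
  · intro h
    have h1 : (a + 1) * (N + 1) ≤ b * (N + 1) := by
      apply mul_le_mul_of_nonneg_right (by omega) (by omega)
    nlinarith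

lemma arith_le_lt (N i j a b : Int) (hj : 0 ≤ j) (hji : j < i) (hiN : i ≤ N)
    (h : a * (N + 1) + i ≤ b * (N + 1) + j) : a < b := by
  by_contra hb
  push_neg at hb
  have h1 : 0 ≤ (a - b) * (N + 1) := mul_nonneg (by omega) (by omega)
  nlinarith

-- inserting a freshly enumerated triple commutes with dropping the index
lemma insert_dec (N : Int) (t : Int × Int × Int) (acc : List (Int × Int × Int))
    (_h0 : 0 ≤ t.1) (hN : t.1 ≤ N) (hacc : ∀ p ∈ acc, 0 ≤ p.1 ∧ p.1 < t.1) :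
    (PySem.List.insertBy (fun a b => decide (Kf N a < Kf N b)) t acc).map (fun p => p.2)
      = PySem.List.insertBy (fun a b => decide (a.1 < b.1)) t.2 (acc.map (fun p => p.2)) := by
  induction acc with
  | nil => simp [PySem.List.insertBy]
  | cons q acc ih =>
    have hq := hacc q (List.mem_cons_self ..)
    have hcmp : decide (Kf N t < Kf N q) = decide (t.2.1 < q.2.1) := by
      simp only [Kf]
      exact decide_eq_decide.mpr (arith_lt_iff N t.1 q.1 t.2.1 q.2.1 hq.1 hq.2 hN)
    simp only [PySem.List.insertBy, List.map_cons, hcmp]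
    by_cases h : t.2.1 < q.2.1
    · simp [h]
    · simp [h, ih (fun p hp => hacc p (List.mem_cons_of_mem _ hp))]

lemma fold_dec (N : Int) (z : List (Int × Int)) :
    ∀ (s : Int) (acc : List (Int × Int × Int)), 0 ≤ s → s + z.length ≤ N →
    (∀ p ∈ acc, 0 ≤ p.1 ∧ p.1 < s) →
    (List.foldl (fun a t => PySem.List.insertBy (fun a b => decide (Kf N a < Kf N b)) t a)
        acc (PySem.List.enumerate z s)).map (fun p => p.2)
      = List.foldl (fun a p => PySem.List.insertBy (fun a b => decide (a.1 < b.1)) p a)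
          (acc.map (fun p => p.2)) z := by
  induction z with
  | nil => intro s acc _ _ _; simp [PySem.List.enumerate_nil]
  | cons p z ih =>
    intro s acc hs hN hacc
    rw [PySem.List.enumerate_cons]
    simp only [List.foldl_cons, List.length_cons] at *
    rw [ih (s + 1) (PySem.List.insertBy (fun a b => decide (Kf N a < Kf N b)) (s, p) acc)
        (by omega) (by omega)
        (fun q hq => by
          rcases (PySem.List.mem_insertBy _ _ _ _).mp hq with h | h
          · subst h; exact ⟨hs, by omega⟩
          · have := hacc q h; exact ⟨this.1, by omega⟩)]
    rw [insert_dec N (s, p) acc hs (by omega) hacc]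

-- dropping the index from the sorted enumerated list gives B's sorted pair list
lemma P_eq (x y : List Int) :
    (Sdec x y).map (fun p => p.2) = PySem.List.sorted (x.zip y) (fun p => p.1) false := by
  rw [Sdec, PySem.List.sorted_eq_foldl_insertBy, PySem.List.sorted_eq_foldl_insertBy]
  have h := fold_dec (x.length : Int) (x.zip y) 0 [] le_rfl
    (by simp only [List.length_zip]; push_cast; omega) (by simp)
  simpa using h

-- projecting the first component commutes with the stable sort by first component
lemma insert_fst (p : Int × Int) (acc : List (Int × Int)) :
    (PySem.List.insertBy (fun a b => decide (a.1 < b.1)) p acc).map (fun q => q.1)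
      = PySem.List.insertBy (fun a b => decide (a < b)) p.1 (acc.map (fun q => q.1)) := by
  induction acc with
  | nil => simp [PySem.List.insertBy]
  | cons q acc ih =>
    simp only [PySem.List.insertBy, List.map_cons]
    by_cases h : p.1 < q.1
    · simp [h]
    · simp [h, ih]

lemma fold_fst (z : List (Int × Int)) :
    ∀ (acc : List (Int × Int)),
    (List.foldl (fun a p => PySem.List.insertBy (fun a b => decide (a.1 < b.1)) p a) acc z).map (fun q => q.1)
      = List.foldl (fun a v => PySem.List.insertBy (fun a b => decide (a < b)) v a)
          (acc.map (fun q => q.1)) (z.map (fun q => q.1)) := by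
  induction z with
  | nil => intro acc; simp
  | cons p z ih =>
    intro acc
    simp only [List.foldl_cons, List.map_cons, ih, insert_fst]

lemma L_eq (x y : List Int) (hpre : x.length ≤ y.length) :
    PySem.List.sorted x (fun v => v) false
      = (PySem.List.sorted (x.zip y) (fun p => p.1) false).map (fun p => p.1) := by
  rw [PySem.List.sorted_eq_foldl_insertBy, PySem.List.sorted_eq_foldl_insertBy]
  have h := fold_fst (x.zip y) []
  have hz : (x.zip y).map (fun q => q.1) = x := by
    have := List.map_fst_zip hpre
    simpa using this
  rw [hz] at h
  simpa using h.symm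

-- ===== the main loop invariant =====
lemma mem_Sdec (x y : List Int) (t : Int × Int × Int) (ht : t ∈ Sdec x y) :
    ∃ (k : Nat) (hk : k < x.length) (hky : k < y.length), t = ((k : Int), (x[k], y[k])) := by
  rw [Sdec, PySem.List.mem_sorted] at ht
  obtain ⟨k, hk, hteq⟩ := (PySem.List.mem_enumerate_iff _ _ _).mp ht
  have hkx : k < x.length := by rw [List.length_zip] at hk; omega
  have hky : k < y.length := by rw [List.length_zip] at hk; omega
  refine ⟨k, hkx, hky, ?_⟩
  rw [hteq, List.getElem_zip]
  simp

lemma nodup_fst_Sdec (x y : List Int) : ((Sdec x y).map (fun t => t.1)).Nodup := by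
  have hperm : (Sdec x y).Perm (PySem.List.enumerate (x.zip y) 0) :=
    PySem.List.sorted_perm _ _ _
  rw [(hperm.map (fun t => t.1)).nodup_iff, PySem.List.map_fst_enumerate]
  exact PySem.List.nodup_pyRange_one _ _

lemma mem_fst_Sdec (x y : List Int) (hpre : x.length ≤ y.length) (j : Nat) (hj : j < x.length) :
    (j : Int) ∈ (Sdec x y).map (fun t => t.1) := by
  have hperm : (Sdec x y).Perm (PySem.List.enumerate (x.zip y) 0) :=
    PySem.List.sorted_perm _ _ _
  rw [(hperm.map (fun t => t.1)).mem_iff, PySem.List.map_fst_enumerate,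
    PySem.List.mem_pyRange_one]
  rw [List.length_zip]
  constructor
  · omega
  · push_cast; omega

lemma pairwise_Sdec (x y : List Int) :
    (Sdec x y).Pairwise (fun a b => Kf (x.length : Int) a ≤ Kf (x.length : Int) b) :=
  PySem.List.sorted_pairwise _ _


lemma foldl_markF_get_unmarked (T : List (Int × Int × Int)) :
    ∀ (m : List (Option Int)) (j : Nat), (∀ t ∈ T, 0 ≤ t.1) →
    (j : Int) ∉ T.map (fun t => t.1) → (T.foldl markF m)[j]? = m[j]? := by
  induction T with
  | nil => intro m j _ _; rfl
  | cons t T ih =>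
    intro m j h0 hj
    simp only [List.map_cons, List.mem_cons, not_or] at hj
    have ht0 : 0 ≤ t.1 := h0 t (List.mem_cons_self ..)
    simp only [List.foldl_cons]
    rw [ih _ j (fun u hu => h0 u (List.mem_cons_of_mem _ hu)) hj.2]
    rw [markF, PySem.List.pySetD_of_nonneg m none ht0]
    exact List.getElem?_set_ne (by omega)

lemma Mmark_get_unmarked (x : List Int) (T : List (Int × Int × Int)) (j : Nat)
    (h0 : ∀ t ∈ T, 0 ≤ t.1) (hj : (j : Int) ∉ T.map (fun t => t.1)) :
    (Mmark x T)[j]? = (x.map some)[j]? :=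
  foldl_markF_get_unmarked T _ j h0 hj

lemma foldl_markF_get_marked (T : List (Int × Int × Int)) :
    ∀ (m : List (Option Int)) (j : Nat), (∀ t ∈ T, 0 ≤ t.1) → j < m.length →
    ((j : Int) ∈ T.map (fun t => t.1) ∨ m[j]? = some none) →
    (T.foldl markF m)[j]? = some none := by
  induction T with
  | nil =>
    intro m j _ _ hj
    rcases hj with hj | hj
    · simp at hj
    · simpa using hj
  | cons t T ih =>
    intro m j h0 hlen hj
    have ht0 : 0 ≤ t.1 := h0 t (List.mem_cons_self ..)
    simp only [List.foldl_cons]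
    have hlen' : j < (markF m t).length := by
      rw [markF, PySem.List.length_pySetD]; exact hlen
    by_cases heq : t.1.toNat = j
    · apply ih _ j (fun u hu => h0 u (List.mem_cons_of_mem _ hu)) hlen'
      right
      rw [markF, PySem.List.pySetD_of_nonneg m none ht0, heq]
      exact List.getElem?_set_self hlen
    · apply ih _ j (fun u hu => h0 u (List.mem_cons_of_mem _ hu)) hlen'
      rcases hj with hj | hj
      · simp only [List.map_cons, List.mem_cons] at hj
        rcases hj with hj | hj
        · exact absurd (by omega : t.1.toNat = j) heq
        · exact Or.inl hj
      · right
        rw [markF, PySem.List.pySetD_of_nonneg m none ht0, List.getElem?_set_ne heq]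
        exact hj

lemma Mmark_get_marked (x : List Int) (T : List (Int × Int × Int)) (j : Nat)
    (h0 : ∀ t ∈ T, 0 ≤ t.1) (hlt : j < x.length) (hj : (j : Int) ∈ T.map (fun t => t.1)) :
    (Mmark x T)[j]? = some none := by
  exact foldl_markF_get_marked T _ j h0 (by simpa using hlt) (Or.inl hj)

lemma index_first {m : List (Option Int)} {v : Int} {k : Nat}
    (h1 : m[k]? = some (some v)) (h2 : ∀ j < k, m[j]? ≠ some (some v)) :
    PySem.List.index? m (some v) = some k := by
  have hk : k < m.length := by
    by_contra h
    rw [List.getElem?_eq_none_iff.mpr (by omega)] at h1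
    simp at h1
  rw [PySem.List.index?_eq_some_iff]
  refine ⟨m.take k, m.drop (k + 1), ?_, by simp [hk.le], ?_⟩
  · conv_lhs => rw [← List.take_append_drop k m]
    rw [List.drop_eq_getElem_cons hk]
    congr 2
    have := h1
    rw [List.getElem?_eq_getElem hk] at this
    exact (Option.some.injEq _ _).mp this
  · intro hmem
    obtain ⟨i, hi, hval⟩ := List.mem_iff_getElem.mp hmem
    have hik : i < k := by
      have := hi; simp [List.length_take] at this; omega
    apply h2 i hik
    rw [List.getElem_take] at hval
    rw [List.getElem?_eq_getElem (by omega), hval]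

lemma loop_inv (x y : List Int) (hpre : x.length ≤ y.length) :
    ∀ (S2 S1 : List (Int × Int × Int)) (ys0 : List Int), S1 ++ S2 = Sdec x y →
    S2.foldl (fun st t => fStep y st t.2.1) (Mmark x S1, ys0)
      = (Mmark x (S1 ++ S2), ys0 ++ S2.map (fun t => t.2.2)) := by
  intro S2
  induction S2 with
  | nil => intro S1 ys0 _; simp
  | cons t S2 ih =>
    intro S1 ys0 hS
    have htS : t ∈ Sdec x y := by
      rw [← hS]; exact List.mem_append_right _ (List.mem_cons_self ..)
    obtain ⟨k, hk, hky, ht⟩ := mem_Sdec x y t htS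
    have h0S1 : ∀ u ∈ S1, 0 ≤ u.1 := by
      intro u hu
      have huS : u ∈ Sdec x y := by rw [← hS]; exact List.mem_append_left _ hu
      obtain ⟨k', _, _, hu'⟩ := mem_Sdec x y u huS
      rw [hu']; exact Int.natCast_nonneg _
    -- the head's index is not yet marked
    have hnd := nodup_fst_Sdec x y
    rw [← hS, List.map_append, List.map_cons, List.nodup_append] at hnd
    have htnot : t.1 ∉ S1.map (fun u => u.1) := by
      intro hmem
      exact hnd.2.2 _ hmem _ (List.mem_cons_self ..) rfl
    subst ht
    have hm1k : (Mmark x S1)[k]? = some (some x[k]) := by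
      rw [Mmark_get_unmarked x S1 k h0S1 (by simpa using htnot)]
      simp [List.getElem?_eq_getElem hk]
    have hpref : ∀ j : Nat, j < k → (Mmark x S1)[j]? ≠ some (some x[k]) := by
      intro j hjk
      by_cases hmem : (j : Int) ∈ S1.map (fun u => u.1)
      · rw [Mmark_get_marked x S1 j h0S1 (by omega) hmem]
        simp
      · have hjx : j < x.length := by omega
        rw [Mmark_get_unmarked x S1 j h0S1 hmem]
        simp only [List.getElem?_map, List.getElem?_eq_getElem hjx, Option.map_some, ne_eq,
          Option.some.injEq]
        -- the value at an unmarked earlier position is strictly larger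
        have hjin := mem_fst_Sdec x y hpre j hjx
        rw [← hS, List.map_append, List.map_cons, List.mem_append, List.mem_cons] at hjin
        rcases hjin with hjin | hjin | hjin
        · exact absurd hjin hmem
        · exfalso
          have hji : (j : Int) = (k : Int) := hjin
          omega
        · obtain ⟨u, huS2, hufst⟩ := List.mem_map.mp hjin
          have huS : u ∈ Sdec x y := by
            rw [← hS]
            exact List.mem_append_right _ (List.mem_cons_of_mem _ huS2)
          obtain ⟨k', hk', hky', hu'⟩ := mem_Sdec x y u huS
          have hk'j : k' = j := by
            rw [hu'] at hufst
            have : (k' : Int) = (j : Int) := hufst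
            omega
          have hp := pairwise_Sdec x y
          rw [← hS] at hp
          have hrel : Kf (x.length : Int) ((k : Int), (x[k], y[k])) ≤ Kf (x.length : Int) u :=
            (List.pairwise_cons.mp (List.pairwise_append.mp hp).2.1).1 u huS2
          rw [hu'] at hrel
          simp only [Kf] at hrel
          have hlt : x[k] < x[k'] :=
            arith_le_lt (x.length : Int) (k : Int) (k' : Int) x[k] x[k']
              (Int.natCast_nonneg _) (by exact_mod_cast (by omega : (k' : Int) < (k : Int)))
              (by exact_mod_cast hk.le) hrel
          subst hk'j
          intro hcontra
          omega
    have hidx : PySem.List.index? (Mmark x S1) (some x[k]) = some k :=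
      index_first hm1k hpref
    simp only [List.foldl_cons]
    have hstep : fStep y (Mmark x S1, ys0) x[k]
        = (Mmark x (S1 ++ [((k : Int), (x[k], y[k]))]), ys0 ++ [y[k]]) := by
      rw [fStep]
      simp only [hidx, Option.getD_some]
      simp only [Prod.mk.injEq]
      refine ⟨?_, ?_⟩
      · rw [Mmark, Mmark, List.foldl_append]
        simp [markF]
      · congr 1
        simp only [PySem.List.pyGetD_natCast]
        rw [List.getD_eq_getElem _ _ hky]
    calc List.foldl (fun st t => fStep y st t.2.1) (fStep y (Mmark x S1, ys0) x[k]) S2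
        = List.foldl (fun st t => fStep y st t.2.1)
            (Mmark x (S1 ++ [((k : Int), (x[k], y[k]))]), ys0 ++ [y[k]]) S2 := by rw [hstep]
      _ = (Mmark x ((S1 ++ [((k : Int), (x[k], y[k]))]) ++ S2),
            (ys0 ++ [y[k]]) ++ S2.map (fun t => t.2.2)) := by
            apply ih
            rw [← hS]; simp
      _ = _ := by simp

lemma A_loop_eq (x y : List Int) (hpre : x.length ≤ y.length) :
    (List.foldl (fun (st : List (Option Int) × List Int) i =>
        fStep y st (PySem.List.pyGetD (PySem.List.sorted x (fun v => v) false) i 0))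
      (x.map some, ([] : List Int)) (PySem.List.pyRange 0 (PySem.List.len x) 1)).2
      = List.map (fun p => p.2) (PySem.List.sorted (x.zip y) (fun p => p.1) false) := by
  rw [show PySem.List.len x = PySem.List.len (PySem.List.sorted x (fun v => v) false) by
    simp [PySem.List.length_sorted]]
  rw [PySem.List.foldl_pyRange_zero_pyGetD]
  have hLS : PySem.List.sorted x (fun v => v) false = (Sdec x y).map (fun t => t.2.1) := by
    rw [L_eq x y hpre, ← P_eq x y, List.map_map]
    rfl
  rw [hLS, List.foldl_map]
  have h := loop_inv x y hpre (Sdec x y) [] []  rfl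
  have h2 := congrArg Prod.snd h
  simp only [List.nil_append, Mmark, List.foldl_nil] at h2
  rw [← P_eq x y, List.map_map]
  exact h2

-- ===== VERDICT (by name: the statement is the Claim_ definition above) =====
theorem listsort_spec : Claim_equal_listsort := by
  intro x y _ hpre
  unfold Spec_listsort
  have hpre' : x.length ≤ y.length := hpre
  simp only [listsort, listsort_alt]
  refine Prod.ext ?_ ?_
  · exact L_eq x y hpre'
  · exact A_loop_eq x y hpre'
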